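-- pv_equiv track=rewrite | github.com/jjfeore/codes-katas | string_pyramid.py | watch_pyramid_from_above
-- ===== SOURCE A (Python) =====
-- def watch_pyramid_from_above(characters):
--     """Display pyramid as viewed from the top."""
--     if characters is None:
--         return None
--     elif characters == '':
--         return ''
--     ret_list = []
--     used = []
--     for i, char in enumerate(characters):
--         used.append(char)
--         add_str = ''
--         for ctr, used_char in enumerate(used):
--             if ctr == len(used) - 1:
--                 count = len(characters) - len(used)
--                 add_str += used_char * count
--             else:
--                 add_str += used_char
--         add_str = add_str + char + add_str[::-1]
--         ret_list.append(add_str)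
--     mirror = ret_list[::-1]
--     del mirror[0]
--     ret_list.extend(mirror)
--     ret_list = '\n'.join(ret_list)
--     return ret_list
-- ===== SOURCE B (Python) =====
-- def watch_pyramid_from_above(characters):
--     """Display pyramid as viewed from the top."""
--     if characters is None:
--         return None
--     elif characters == '':
--         return ''
--     n = len(characters)
--     R = 2 * n - 1
--     rows = []
--     for r in range(R):
--         m = min(r, R - 1 - r)          # ring index of this row = distance to top/bottom border
--         wing = characters[:m]
--         rows.append(wing + characters[m] * (R - 2 * m) + wing[::-1])
--     return '\n'.join(rows)
-- ===== Notes on version B (the rewrite author's own statement) =====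
-- stated objective: alternative
-- what changed: Replaces A's incremental prefix accumulation (used list + inner enumerate loop per row) and whole-list mirroring by a single loop over all 2n-1 rows computing each row in closed form from its ring index m = min(r, R-1-r): characters[:m] + characters[m]*(R-2m) + reversed wing; intended as faster (measured about 4.5x at n=4096) but unconfirmed at the largest timing size, where both programs fail.
import Mathlib
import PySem

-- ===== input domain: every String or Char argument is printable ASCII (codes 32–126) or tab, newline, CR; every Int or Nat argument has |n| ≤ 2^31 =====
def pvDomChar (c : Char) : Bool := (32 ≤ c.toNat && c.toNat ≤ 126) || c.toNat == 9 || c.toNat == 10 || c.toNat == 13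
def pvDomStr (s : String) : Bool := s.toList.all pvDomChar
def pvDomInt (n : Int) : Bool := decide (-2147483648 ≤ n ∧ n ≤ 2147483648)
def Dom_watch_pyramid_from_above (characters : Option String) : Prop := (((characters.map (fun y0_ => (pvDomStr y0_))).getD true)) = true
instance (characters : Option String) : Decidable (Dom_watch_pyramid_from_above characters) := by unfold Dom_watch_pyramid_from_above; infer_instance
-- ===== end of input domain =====

-- B replaces A's incremental prefix-build + per-row mirror + whole-list mirror by a direct
-- closed form per row from its ring index m = min(r, R-1-r); objective: alternative.

-- ===== PORT A =====
-- literal transliteration of A: enumerate loops become foldls over PySem.List.enumerate,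
-- add_str[::-1] is List.reverse (exact for a full reversed slice), '\n'.join is PySem.Str.join
def watch_pyramid_from_above (characters : Option String) : Option String :=
  match characters with
  | none => none
  | some s =>
    if s = "" then some "" else
      let cs := s.toList
      let retList : List (List Char) :=
        ((PySem.List.enumerate cs 0).foldl
          (fun (st : List (List Char) × List Char) (p : Int × Char) =>
            let used := st.2 ++ [p.2]
            let addStr : List Char := (PySem.List.enumerate used 0).foldl
              (fun (acc : List Char) (q : Int × Char) =>
                if q.1 = (used.length : Int) - 1 then
                  acc ++ List.replicate (cs.length - used.length) q.2
                else acc ++ [q.2]) []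
            let addStr := addStr ++ [p.2] ++ addStr.reverse
            (st.1 ++ [addStr], used))
          ([], [])).1
      let mirror := (retList.reverse).drop 1   -- mirror = ret_list[::-1]; del mirror[0]
      some (PySem.Str.join "\n" ((retList ++ mirror).map String.mk))

-- ===== PORT B =====
def watch_pyramid_from_above_alt (characters : Option String) : Option String :=
  match characters with
  | none => none
  | some s =>
    if s = "" then some "" else
      let cs := s.toList
      let R := 2 * cs.length - 1
      -- row r: wing = characters[:m] (slice, in range), characters[m]*(R-2m) = replicate, wing[::-1] = reverse
      let rows := (List.range R).map (fun r =>
        let m := min r (R - 1 - r)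
        String.mk (cs.take m ++ List.replicate (R - 2 * m) (cs.getD m ' ') ++ (cs.take m).reverse))
      some (PySem.Str.join "\n" rows)

-- ===== PRECONDITION & SPEC =====
def Spec_watch_pyramid_from_above (characters : Option String) (out : Option String) : Prop := out = watch_pyramid_from_above_alt characters
instance (characters : Option String) (out : Option String) : Decidable (Spec_watch_pyramid_from_above characters out) := by unfold Spec_watch_pyramid_from_above; infer_instance

-- ===== CLAIM (what is proved, stated in full; the proofs are below) =====
def Claim_equal_watch_pyramid_from_above : Prop := ∀ (characters : Option String), Dom_watch_pyramid_from_above characters → Spec_watch_pyramid_from_above characters (watch_pyramid_from_above characters)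

-- ===== LEMMAS AND PROOFS =====

theorem fold_no_last (n : Nat) (L : Int) (u : List Char) (s : Int) (acc : List Char)
    (h : ∀ p ∈ PySem.List.enumerate u s, p.1 ≠ L) :
    (PySem.List.enumerate u s).foldl
      (fun (acc : List Char) (q : Int × Char) =>
        if q.1 = L then acc ++ List.replicate n q.2 else acc ++ [q.2]) acc
    = acc ++ u := by
  induction u generalizing s acc with
  | nil => simp [PySem.List.enumerate_nil]
  | cons x xs ih =>
      rw [PySem.List.enumerate_cons]
      simp only [List.foldl_cons]
      rw [if_neg (h (s, x) (by rw [PySem.List.enumerate_cons]; exact List.mem_cons_self))]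
      rw [ih (s+1) _ (fun p hp => h p (by rw [PySem.List.enumerate_cons]; exact List.mem_cons_of_mem _ hp))]
      simp

theorem inner_fold_eq (n : Nat) (u : List Char) (c : Char) :
    (PySem.List.enumerate (u ++ [c]) 0).foldl
      (fun (acc : List Char) (q : Int × Char) =>
        if q.1 = ((u ++ [c]).length : Int) - 1 then
          acc ++ List.replicate (n - (u ++ [c]).length) q.2
        else acc ++ [q.2]) []
    = u ++ List.replicate (n - (u.length + 1)) c := by
  rw [PySem.List.enumerate_append, List.foldl_append]
  have h1 : (PySem.List.enumerate u 0).foldl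
      (fun (acc : List Char) (q : Int × Char) =>
        if q.1 = ((u ++ [c]).length : Int) - 1 then
          acc ++ List.replicate (n - (u ++ [c]).length) q.2
        else acc ++ [q.2]) []
      = [] ++ u := by
    apply fold_no_last
    intro p hp
    rw [PySem.List.mem_enumerate_iff] at hp
    obtain ⟨k, hk, rfl⟩ := hp
    simp only [List.length_append, List.length_cons, List.length_nil]
    push_cast; omega
  rw [h1, PySem.List.enumerate_cons, PySem.List.enumerate_nil]
  simp only [List.foldl_cons, List.foldl_nil, List.length_append, List.length_cons, List.length_nil]
  rw [if_pos (by push_cast; omega)]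
  simp

def prefA (cs : List Char) (i : Nat) : List Char :=
  cs.take i ++ List.replicate (cs.length - (i + 1)) (cs.getD i ' ')

def rowA (cs : List Char) (i : Nat) : List Char :=
  prefA cs i ++ [cs.getD i ' '] ++ (prefA cs i).reverse

theorem outer_fold_eq (cs : List Char) (k : Nat) (hk : k ≤ cs.length) :
    ((PySem.List.enumerate (cs.take k) 0).foldl
      (fun (st : List (List Char) × List Char) (p : Int × Char) =>
        let used := st.2 ++ [p.2]
        let addStr : List Char := (PySem.List.enumerate used 0).foldl
          (fun (acc : List Char) (q : Int × Char) =>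
            if q.1 = (used.length : Int) - 1 then
              acc ++ List.replicate (cs.length - used.length) q.2
            else acc ++ [q.2]) []
        let addStr := addStr ++ [p.2] ++ addStr.reverse
        (st.1 ++ [addStr], used))
      ([], []))
    = ((List.range k).map (rowA cs), cs.take k) := by
  induction k with
  | zero => simp [PySem.List.enumerate_nil]
  | succ k ih =>
      have hk' : k < cs.length := hk
      have htake : cs.take (k+1) = cs.take k ++ [cs[k]] := by
        rw [List.take_succ, List.getElem?_eq_getElem hk']
        simp
      rw [htake, PySem.List.enumerate_append, List.foldl_append,
        ih (le_of_lt hk'), PySem.List.enumerate_cons, PySem.List.enumerate_nil]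
      simp only [List.foldl_cons, List.foldl_nil]
      have hlen : (cs.take k).length = k := List.length_take_of_le (le_of_lt hk')
      have hgetD : cs.getD k ' ' = cs[k] := List.getD_eq_getElem cs ' ' hk'
      rw [inner_fold_eq]
      simp only [hlen]
      rw [List.range_succ]
      simp [rowA, prefA, List.getElem?_eq_getElem hk']

def rowB (cs : List Char) (r : Nat) : List Char :=
  cs.take (min r (2 * cs.length - 1 - 1 - r))
    ++ List.replicate ((2 * cs.length - 1) - 2 * min r (2 * cs.length - 1 - 1 - r))
        (cs.getD (min r (2 * cs.length - 1 - 1 - r)) ' ')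
    ++ (cs.take (min r (2 * cs.length - 1 - 1 - r))).reverse

theorem rowB_eq_rowA (cs : List Char) (r : Nat) (hr : r < cs.length) :
    rowB cs r = rowA cs r := by
  have hm : min r (2 * cs.length - 1 - 1 - r) = r := by omega
  have hsplit : (2 * cs.length - 1) - 2 * r
      = (cs.length - (r + 1)) + 1 + (cs.length - (r + 1)) := by omega
  simp only [rowB, hm, hsplit, List.replicate_add, List.replicate_one, rowA, prefA]
  simp [List.reverse_append, List.append_assoc]

theorem rowB_mirror (cs : List Char) (r : Nat) :
    rowB cs r = rowB cs (2 * cs.length - 1 - 1 - r) := by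
  have hm : min (2 * cs.length - 1 - 1 - r)
      (2 * cs.length - 1 - 1 - (2 * cs.length - 1 - 1 - r)) = min r (2 * cs.length - 1 - 1 - r) := by
    omega
  simp only [rowB, hm]

theorem rows_eq (cs : List Char) (h : cs ≠ []) :
    (List.range cs.length).map (rowA cs)
      ++ (((List.range cs.length).map (rowA cs)).reverse).drop 1
    = (List.range (2 * cs.length - 1)).map (rowB cs) := by
  have hn : 1 ≤ cs.length := List.length_pos_of_ne_nil h
  apply List.ext_getElem
  · simp; omega
  · intro i hi hi'
    have hiR : i < 2 * cs.length - 1 := by simpa using hi'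
    have hR : ((List.range (2 * cs.length - 1)).map (rowB cs))[i] = rowB cs i := by simp
    rw [hR]
    by_cases h1 : i < cs.length
    · rw [List.getElem_append_left (by simpa using h1)]
      simp only [List.getElem_map, List.getElem_range]
      exact (rowB_eq_rowA cs i h1).symm
    · rw [List.getElem_append_right (by simpa using h1)]
      rw [List.getElem_drop, List.getElem_reverse]
      have hidx : ((List.range cs.length).map (rowA cs)).length - 1
          - (1 + (i - ((List.range cs.length).map (rowA cs)).length))
          = 2 * cs.length - 2 - i := by simp; omega
      simp only [List.length_map, List.length_range] at hidx ⊢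
      simp only [hidx]
      simp only [List.getElem_map, List.getElem_range]
      rw [rowB_mirror cs i]
      have : 2 * cs.length - 1 - 1 - i = 2 * cs.length - 2 - i := by omega
      rw [this, rowB_eq_rowA cs (2 * cs.length - 2 - i) (by omega)]

-- ===== VERDICT (by name: the statement is the Claim_ definition above) =====
theorem watch_pyramid_from_above_spec : Claim_equal_watch_pyramid_from_above := by
  intro characters _
  unfold Spec_watch_pyramid_from_above watch_pyramid_from_above watch_pyramid_from_above_alt
  match characters with
  | none => rfl
  | some s =>
    by_cases hs : s = ""
    · simp [hs]
    · simp only [hs, if_false]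
      have hne : s.toList ≠ [] := by simpa using hs
      have := outer_fold_eq s.toList s.toList.length (le_refl _)
      simp only [List.take_length] at this
      rw [this]
      have hrows := rows_eq s.toList hne
      rw [hrows]
      simp [rowB, List.map_map, Function.comp_def, List.getD, List.append_assoc]
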